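-- pv_equiv track=rewrite | github.com/ansaritocode/infoproject | py/search.py | binary_search_text
-- ===== SOURCE A (Python) =====
-- def clean_line(line):
--     return line.strip().lower()
--
-- def binary_search_text(text, keyword):
--     lines = sorted([clean_line(l) for l in text.splitlines()])
--     keyword = keyword.strip().lower()
--     low, high = 0, len(lines) - 1
--
--     while low <= high:
--         mid = (low + high) // 2
--         if lines[mid] == keyword:
--             return f"Match found: {lines[mid]}"
--         elif lines[mid] < keyword:
--             low = mid + 1
--         else:
--             high = mid - 1
--
--     return "No matches found with binary search."
-- ===== SOURCE B (Python) =====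
-- def binary_search_text(text, keyword):
--     kw = keyword.strip().lower()
--     for line in text.splitlines():
--         cleaned = line.strip().lower()
--         if cleaned == kw:
--             return f"Match found: {cleaned}"
--     return "No matches found with binary search."
-- ===== Notes on version B (the rewrite author's own statement) =====
-- stated objective: simpler
-- what changed: Replaced sort + hand-written binary-search bisection with a single linear scan over the cleaned lines in original order, returning on the first equal line.
import Mathlib
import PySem

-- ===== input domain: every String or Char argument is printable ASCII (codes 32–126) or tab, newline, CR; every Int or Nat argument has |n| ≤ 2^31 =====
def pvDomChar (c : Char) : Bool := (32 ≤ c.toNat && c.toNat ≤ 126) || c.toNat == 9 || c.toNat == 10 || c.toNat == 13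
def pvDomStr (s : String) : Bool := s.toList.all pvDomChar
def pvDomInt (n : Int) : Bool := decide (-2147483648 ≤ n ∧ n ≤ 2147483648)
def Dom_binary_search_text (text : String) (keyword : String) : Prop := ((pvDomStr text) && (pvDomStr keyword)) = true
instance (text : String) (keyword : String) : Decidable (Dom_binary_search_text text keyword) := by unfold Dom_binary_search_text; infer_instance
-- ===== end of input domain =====

-- B replaces A's sort + hand-rolled bisection by one linear scan over the cleaned lines
-- in original order (simpler; the return strings are identical).

-- ===== PORT A =====
def clean_line (line : String) : String := PySem.Str.lower (PySem.Str.strip line)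

-- A's while-loop; lines[mid] is always in range when the loop body runs (0 ≤ low ≤ mid ≤ high < len),
-- so the indexing is ported with pyGetD (the default is never used under that invariant).
def pvBsLoop (lines : List String) (keyword : String) (low high : Int) : String :=
  if hlh : low ≤ high then
    let mid := PySem.Int.floordiv (low + high) 2
    let v := PySem.List.pyGetD lines mid ""
    if v == keyword then "Match found: " ++ v
    else if v < keyword then pvBsLoop lines keyword (mid + 1) high
    else pvBsLoop lines keyword low (mid - 1)
  else "No matches found with binary search."
termination_by (high + 1 - low).toNat
decreasing_by
  · have h := PySem.Int.floordiv_two_mid_bounds (lo := low) (hi := high) hlh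
    omega
  · have h := PySem.Int.floordiv_two_mid_bounds (lo := low) (hi := high) hlh
    omega

def binary_search_text (text : String) (keyword : String) : String :=
  let lines := PySem.List.sorted ((PySem.Str.splitlines text).map clean_line) (fun x => x) false
  let kw := PySem.Str.lower (PySem.Str.strip keyword)
  pvBsLoop lines kw 0 ((lines.length : Int) - 1)

-- ===== PORT B =====
-- the for-loop of Source B: first cleaned line equal to kw wins
def pvScan (lines : List String) (kw : String) : String :=
  match lines with
  | [] => "No matches found with binary search."
  | l :: rest =>
    let cleaned := PySem.Str.lower (PySem.Str.strip l)
    if cleaned == kw then "Match found: " ++ cleaned else pvScan rest kw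

def binary_search_text_alt (text : String) (keyword : String) : String :=
  pvScan (PySem.Str.splitlines text) (PySem.Str.lower (PySem.Str.strip keyword))

-- ===== PRECONDITION & SPEC =====
def Spec_binary_search_text (text : String) (keyword : String) (out : String) : Prop := out = binary_search_text_alt text keyword
instance (text : String) (keyword : String) (out : String) : Decidable (Spec_binary_search_text text keyword out) := by unfold Spec_binary_search_text; infer_instance

-- ===== CLAIM (what is proved, stated in full; the proofs are below) =====
def Claim_equal_binary_search_text : Prop := ∀ (text : String) (keyword : String), Dom_binary_search_text text keyword → Spec_binary_search_text text keyword (binary_search_text text keyword)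

-- ===== LEMMAS AND PROOFS =====

-- B's scan returns the match message (with the keyword itself) iff some cleaned line equals kw.
lemma pvScan_eq (lines : List String) (kw : String) :
    pvScan lines kw =
      if kw ∈ lines.map clean_line then "Match found: " ++ kw
      else "No matches found with binary search." := by
  induction lines with
  | nil => simp [pvScan]
  | cons l rest ih =>
    simp only [pvScan, List.map_cons, List.mem_cons, beq_iff_eq]
    by_cases h : PySem.Str.lower (PySem.Str.strip l) = kw
    · rw [if_pos h, if_pos (Or.inl (by simp [clean_line, h]))]
      rw [h]
    · rw [if_neg h, ih]
      have hd : ¬ kw = clean_line l := fun hk => h (by simpa [clean_line] using hk.symm)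
      simp [hd]

-- if kw is not in lines at all, the loop reports no match
lemma pvBsLoop_not_mem (lines : List String) (kw : String) (hnm : kw ∉ lines) :
    ∀ (low high : Int), 0 ≤ low → high < (lines.length : Int) →
      pvBsLoop lines kw low high = "No matches found with binary search." := by
  intro low high h0 hh
  induction hn : (high + 1 - low).toNat using Nat.strong_induction_on generalizing low high with
  | _ n ih =>
    rw [pvBsLoop]
    by_cases hlh : low ≤ high
    · simp only [hlh, dif_pos, beq_iff_eq]
      have hmid := PySem.Int.floordiv_two_mid_bounds (lo := low) (hi := high) hlh
      have hget : PySem.List.pyGetD lines (PySem.Int.floordiv (low + high) 2) "" ∈ lines := by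
        rw [PySem.List.pyGetD_eq_getElem (xs := lines) (d := "") (by omega) (by omega)]
        exact List.getElem_mem _
      have hne : ¬ PySem.List.pyGetD lines (PySem.Int.floordiv (low + high) 2) "" = kw :=
        fun h => hnm (h ▸ hget)
      rw [if_neg hne]
      split
      · exact ih _ (by omega) _ _ (by omega) (by omega) rfl
      · exact ih _ (by omega) _ _ (by omega) (by omega) rfl
    · simp [hlh]

-- completeness on a monotone (sorted) list: if kw occurs at some index inside the window,
-- the loop finds it and answers with kw itself
lemma pvBsLoop_found (lines : List String) (kw : String)
    (hmono : ∀ (p q : Nat), (hpq : p ≤ q) → (hq : q < lines.length) →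
      lines[p]'(by omega) ≤ lines[q]'hq) :
    ∀ (low high : Int), 0 ≤ low → high < (lines.length : Int) →
      (∃ i : Nat, ∃ hi : i < lines.length, low ≤ (i : Int) ∧ (i : Int) ≤ high ∧ lines[i]'hi = kw) →
      pvBsLoop lines kw low high = "Match found: " ++ kw := by
  intro low high h0 hh hex
  induction hn : (high + 1 - low).toNat using Nat.strong_induction_on generalizing low high with
  | _ n ih =>
    obtain ⟨i, hi, hil, hih, hieq⟩ := hex
    have hlh : low ≤ high := le_trans hil hih
    rw [pvBsLoop]
    simp only [hlh, dif_pos, beq_iff_eq]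
    have hmid := PySem.Int.floordiv_two_mid_bounds (lo := low) (hi := high) hlh
    set mid := PySem.Int.floordiv (low + high) 2 with hmiddef
    have hmn : mid.toNat < lines.length := by omega
    have hgv : PySem.List.pyGetD lines mid "" = lines[mid.toNat]'hmn :=
      PySem.List.pyGetD_eq_getElem (xs := lines) (d := "") (by omega) (by omega)
    by_cases he : PySem.List.pyGetD lines mid "" = kw
    · rw [if_pos he, he]
    · rw [if_neg he]
      by_cases hlt : PySem.List.pyGetD lines mid "" < kw
      · -- lines[mid] < kw : kw's index i must be > mid
        rw [if_pos hlt]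
        have hi_gt : mid < (i : Int) := by
          by_contra hcon
          push Not at hcon
          have hle : lines[i]'hi ≤ lines[mid.toNat]'hmn := hmono i mid.toNat (by omega) hmn
          rw [hieq, ← hgv] at hle
          exact absurd (lt_of_le_of_lt hle hlt) (lt_irrefl _)
        exact ih _ (by omega) _ _ (by omega) hh ⟨i, hi, by omega, hih, hieq⟩ rfl
      · -- lines[mid] > kw : kw's index i must be < mid
        rw [if_neg hlt]
        have hi_lt : (i : Int) < mid := by
          by_contra hcon
          push Not at hcon
          have hle : lines[mid.toNat]'hmn ≤ lines[i]'hi := hmono mid.toNat i (by omega) hi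
          rw [hieq, ← hgv] at hle
          rcases lt_or_eq_of_le hle with hc | hc
          · exact hlt hc
          · exact he hc
        exact ih _ (by omega) _ _ h0 (by omega) ⟨i, hi, hil, by omega, hieq⟩ rfl

-- A's whole function, characterised by membership of kw among the cleaned lines
lemma binary_search_text_eq (text : String) (keyword : String) :
    binary_search_text text keyword =
      if PySem.Str.lower (PySem.Str.strip keyword) ∈ (PySem.Str.splitlines text).map clean_line
      then "Match found: " ++ PySem.Str.lower (PySem.Str.strip keyword)
      else "No matches found with binary search." := by
  unfold binary_search_text
  set kw := PySem.Str.lower (PySem.Str.strip keyword) with hkw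
  set lines := PySem.List.sorted ((PySem.Str.splitlines text).map clean_line) (fun x => x) false with hl
  have hperm : kw ∈ lines ↔ kw ∈ (PySem.Str.splitlines text).map clean_line := by
    exact PySem.List.mem_sorted ((PySem.Str.splitlines text).map clean_line)
      (fun x => x) false kw
  by_cases hm : kw ∈ (PySem.Str.splitlines text).map clean_line
  · rw [if_pos hm]
    have hmem : kw ∈ lines := hperm.mpr hm
    obtain ⟨i, hi, hieq⟩ := List.getElem_of_mem hmem
    refine pvBsLoop_found lines kw ?_ 0 ((lines.length : Int) - 1) le_rfl (by omega)
      ⟨i, hi, by omega, by omega, hieq⟩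
    intro p q hpq hq
    exact PySem.List.sorted_id_getElem_mono ((PySem.Str.splitlines text).map clean_line) hpq hq
  · rw [if_neg hm]
    exact pvBsLoop_not_mem lines kw (fun h => hm (hperm.mp h)) 0 ((lines.length : Int) - 1)
      le_rfl (by omega)

-- ===== VERDICT (by name: the statement is the Claim_ definition above) =====
theorem binary_search_text_spec : Claim_equal_binary_search_text := by
  intro text keyword _
  unfold Spec_binary_search_text binary_search_text_alt
  rw [binary_search_text_eq, pvScan_eq]
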